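-- pv_equiv track=rewrite | github.com/chrislyons/factory | agents/ig88/scripts/mr_scan_cycle.py | get_open_positions
-- ===== SOURCE A (Python) =====
-- def get_open_positions(trades: list[dict]) -> dict:
--     """Return dict of {pair_symbol: latest_open_trade} for dedup."""
--     open_by_pair = {}
--     for t in trades:
--         if t.get('outcome') == 'open':
--             pair = t.get('pair', '')
--             # Keep latest entry per pair
--             if pair not in open_by_pair or t.get('entry_timestamp', '') > open_by_pair[pair].get('entry_timestamp', ''):
--                 open_by_pair[pair] = t
--     return open_by_pair
-- ===== SOURCE B (Python) =====
-- def get_open_positions(trades: list[dict]) -> dict: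
--     """Return dict of {pair_symbol: latest_open_trade} for dedup.
--
--     Group-then-reduce: first bucket the open trades by pair, then take
--     the (first) maximum by entry_timestamp of each bucket.
--     """
--     groups = {}
--     for t in trades:
--         if t.get('outcome') == 'open':
--             groups.setdefault(t.get('pair', ''), []).append(t)
--     return {pair: max(group, key=lambda t: t.get('entry_timestamp', ''))
--             for pair, group in groups.items()}
-- ===== Notes on version B (the rewrite author's own statement) =====
-- stated objective: alternative
-- what changed: Replaces A's single-pass running-best-per-pair update with a group-then-reduce structure: one pass buckets open trades by pair, then a dict comprehension takes max(group, key=entry_timestamp) per bucket.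
import Mathlib
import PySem

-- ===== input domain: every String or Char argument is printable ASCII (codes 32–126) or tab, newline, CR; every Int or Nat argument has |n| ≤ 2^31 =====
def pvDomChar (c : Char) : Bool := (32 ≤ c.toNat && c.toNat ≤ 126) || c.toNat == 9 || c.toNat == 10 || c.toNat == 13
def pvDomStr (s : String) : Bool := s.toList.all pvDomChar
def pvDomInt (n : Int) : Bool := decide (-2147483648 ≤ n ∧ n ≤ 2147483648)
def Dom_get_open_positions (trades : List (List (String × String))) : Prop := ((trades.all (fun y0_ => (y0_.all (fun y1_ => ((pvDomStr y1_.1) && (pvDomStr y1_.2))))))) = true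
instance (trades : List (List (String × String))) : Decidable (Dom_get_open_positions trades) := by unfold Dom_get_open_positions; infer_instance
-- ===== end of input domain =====

-- B replaces A's single-pass running-best-per-pair update with a group-then-reduce
-- structure (bucket open trades by pair, then take the first maximum by timestamp
-- of each bucket); alternative decomposition, same cost.


-- ===== PORT A =====
-- A's loop body: if t['outcome'] == 'open' and (pair unseen or t's timestamp is
-- strictly later than the kept trade's), store t under t.get('pair', '').
def pvStepA (acc : PySem.Dict String (PySem.Dict String String))
    (t : List (String × String)) : PySem.Dict String (PySem.Dict String String) :=
  let td := PySem.Dict.ofList t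
  if td.get? "outcome" = some "open" then
    let pair := td.getD "pair" ""
    -- 'pair not in open_by_pair or t[ts] > open_by_pair[pair][ts]'; the getD default
    -- is only reachable when the first disjunct fails (short-circuit 'or'), i.e. pair present
    if acc.contains pair = false ∨
        (acc.getD pair PySem.Dict.empty).getD "entry_timestamp" "" < td.getD "entry_timestamp" "" then
      acc.insert pair td
    else acc
  else acc

def get_open_positions (trades : List (List (String × String))) : List (String × List (String × String)) :=
  (trades.foldl pvStepA PySem.Dict.empty).items.map (fun p => (p.1, p.2.items))

-- ===== PORT B =====
-- max(group, key=lambda t: t.get('entry_timestamp', '')): groups are never empty, so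
-- max? is always some; the .getD Dict.empty only totalizes the port.
def pvMaxByTs (group : List (PySem.Dict String String)) : PySem.Dict String String :=
  (PySem.List.max? group (fun t => t.getD "entry_timestamp" "")).getD PySem.Dict.empty

-- groups.setdefault(t.get('pair',''), []).append(t)  ==  modify pair [] (· ++ [t])
def pvStepB (g : PySem.Dict String (List (PySem.Dict String String)))
    (t : List (String × String)) : PySem.Dict String (List (PySem.Dict String String)) :=
  let td := PySem.Dict.ofList t
  if td.get? "outcome" = some "open" then
    g.modify (td.getD "pair" "") [] (· ++ [td])
  else g

def get_open_positions_alt (trades : List (List (String × String))) : List (String × List (String × String)) :=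
  (trades.foldl pvStepB PySem.Dict.empty).items.map (fun p => (p.1, (pvMaxByTs p.2).items))

-- ===== PRECONDITION & SPEC =====
def Spec_get_open_positions (trades : List (List (String × String))) (out : List (String × List (String × String))) : Prop := out = get_open_positions_alt trades
instance (trades : List (List (String × String))) (out : List (String × List (String × String))) : Decidable (Spec_get_open_positions trades out) := by unfold Spec_get_open_positions; infer_instance

-- ===== CLAIM (what is proved, stated in full; the proofs are below) =====
def Claim_equal_get_open_positions : Prop := ∀ (trades : List (List (String × String))), Dom_get_open_positions trades → Spec_get_open_positions trades (get_open_positions trades)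

-- ===== LEMMAS AND PROOFS =====

-- The loop invariant: A's accumulator is B's grouping accumulator with every bucket
-- reduced by pvMaxByTs; buckets are nonempty and keys unique.
def pvInv (a : PySem.Dict String (PySem.Dict String String))
    (g : PySem.Dict String (List (PySem.Dict String String))) : Prop :=
  a.items = g.items.map (fun p => (p.1, pvMaxByTs p.2)) ∧
  (∀ p ∈ g.items, p.2 ≠ []) ∧ g.keys.Nodup

theorem pv_max?_append_singleton {α κ : Type} [LT κ] [DecidableLT κ]
    (l : List α) (x : α) (key : α → κ) :
    PySem.List.max? (l ++ [x]) key =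
      match PySem.List.max? l key with
      | none => some x
      | some m => if key m < key x then some x else some m := by
  simp only [PySem.List.max?, List.foldl_append]
  rfl

theorem pvMaxByTs_append (l : List (PySem.Dict String String)) (x : PySem.Dict String String)
    (hl : l ≠ []) :
    pvMaxByTs (l ++ [x]) =
      if (pvMaxByTs l).getD "entry_timestamp" "" < x.getD "entry_timestamp" "" then x
      else pvMaxByTs l := by
  rcases hm : PySem.List.max? l (fun t => t.getD "entry_timestamp" "") with _ | m
  · exact absurd ((PySem.List.max?_eq_none_iff _ _).mp hm) hl
  · unfold pvMaxByTs
    rw [pv_max?_append_singleton, hm]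
    simp only [Option.getD_some]
    split <;> rfl

theorem pv_inv_step (a : PySem.Dict String (PySem.Dict String String))
    (g : PySem.Dict String (List (PySem.Dict String String)))
    (t : List (String × String)) (h : pvInv a g) : pvInv (pvStepA a t) (pvStepB g t) := by
  obtain ⟨hitems, hne, hnd⟩ := h
  have hkeys : a.keys = g.keys := by
    simp only [PySem.Dict.keys, hitems, List.map_map]
    rfl
  have hand : a.keys.Nodup := hkeys ▸ hnd
  unfold pvStepA pvStepB
  set td := PySem.Dict.ofList t with htd
  by_cases ho : td.get? "outcome" = some "open"
  swap
  · simp only [ho, ite_false]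
    exact ⟨hitems, hne, hnd⟩
  simp only [ho, ite_true]
  set pair := td.getD "pair" "" with hpair
  have hcontains : a.contains pair = g.contains pair := by
    rw [PySem.Dict.contains_eq_decide_mem_keys, PySem.Dict.contains_eq_decide_mem_keys, hkeys]
  by_cases hc : g.contains pair = true
  swap
  -- pair not seen yet: both sides append a fresh key
  · have hc' : g.contains pair = false := by simpa using hc
    have ha' : a.contains pair = false := by rw [hcontains, hc']
    have hgD : g.getD pair [] = [] := PySem.Dict.getD_of_not_contains g _ hc'
    rw [if_pos (Or.inl ha')]
    refine ⟨?_, ?_, ?_⟩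
    · rw [PySem.Dict.items_insert_of_not_contains a _ ha',
        PySem.Dict.modify, hgD,
        PySem.Dict.items_insert_of_not_contains g _ (by simpa using hc'),
        List.map_append, hitems]
      simp [pvMaxByTs, PySem.List.max?]
    · intro p hp
      rw [PySem.Dict.modify, hgD] at hp
      rcases (PySem.Dict.mem_items_insert _ _ _ _).mp hp with h1 | h1
      · subst h1; simp
      · exact hne p h1.1
    · rw [PySem.Dict.modify]
      exact PySem.Dict.nodup_keys_insert _ _ _ hnd
  -- pair already present
  obtain ⟨gp, hgp⟩ : ∃ gp, g.get? pair = some gp := by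
    have := PySem.Dict.contains_eq_isSome_get? g pair
    rw [hc] at this
    exact Option.isSome_iff_exists.mp this.symm
  have hgpmem : (pair, gp) ∈ g.items := PySem.Dict.mem_items_of_get?_eq_some g hgp
  have hgpne : gp ≠ [] := hne (pair, gp) hgpmem
  have hgD : g.getD pair [] = gp := PySem.Dict.getD_of_get?_eq_some g _ hgp
  have hamem : (pair, pvMaxByTs gp) ∈ a.items := by
    rw [hitems]
    exact List.mem_map.mpr ⟨(pair, gp), hgpmem, rfl⟩
  have haget : a.get? pair = some (pvMaxByTs gp) := PySem.Dict.get?_of_mem_items a hamem hand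
  have haD : a.getD pair PySem.Dict.empty = pvMaxByTs gp :=
    PySem.Dict.getD_of_get?_eq_some a _ haget
  have hac : a.contains pair = true := by rw [hcontains, hc]
  have hval : ∀ p ∈ g.items, p.1 = pair → p.2 = gp := by
    intro p hp h1
    have : g.get? p.1 = some p.2 :=
      (PySem.Dict.get?_eq_some_iff_mem_items g _ _ hnd).mpr (by simpa using hp)
    rw [h1, hgp] at this
    exact (Option.some_inj.mp this).symm
  have hmax := pvMaxByTs_append gp td hgpne
  have hBitems : (g.modify pair [] (· ++ [td])).items =
      g.items.map (fun p => if p.1 == pair then (pair, gp ++ [td]) else p) := by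
    rw [PySem.Dict.modify, hgD, PySem.Dict.items_insert_of_contains g _ hc]
  have hBne : ∀ p ∈ (g.modify pair [] (· ++ [td])).items, p.2 ≠ [] := by
    intro p hp
    rw [PySem.Dict.modify, hgD] at hp
    rcases (PySem.Dict.mem_items_insert _ _ _ _).mp hp with h1 | h1
    · subst h1; simp [hgpne]
    · exact hne p h1.1
  have hBnd : (g.modify pair [] (· ++ [td])).keys.Nodup := by
    rw [PySem.Dict.modify]
    exact PySem.Dict.nodup_keys_insert _ _ _ hnd
  by_cases hlt : (a.getD pair PySem.Dict.empty).getD "entry_timestamp" "" < td.getD "entry_timestamp" ""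
  · -- strictly later timestamp: A overwrites, B's bucket max becomes td
    rw [if_pos (Or.inr hlt)]
    refine ⟨?_, hBne, hBnd⟩
    rw [PySem.Dict.items_insert_of_contains a _ hac, hBitems, hitems, List.map_map, List.map_map]
    apply List.map_congr_left
    intro p hp
    by_cases h1 : p.1 = pair
    · simp only [Function.comp, h1, beq_self_eq_true, if_true]
      rw [hmax, if_pos (by rwa [haD] at hlt)]
    · simp [Function.comp, h1]
  · -- not later: A keeps its trade, B's bucket max is unchanged
    rw [if_neg (by simp [hac, hlt])]
    refine ⟨?_, hBne, hBnd⟩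
    rw [hBitems, List.map_map, hitems]
    apply List.map_congr_left
    intro p hp
    by_cases h1 : p.1 = pair
    · simp only [Function.comp, h1, beq_self_eq_true, if_true]
      rw [hval p hp h1, hmax, if_neg (by rwa [haD] at hlt)]
    · simp [Function.comp, h1]

theorem pv_inv_foldl (trades : List (List (String × String)))
    (a : PySem.Dict String (PySem.Dict String String))
    (g : PySem.Dict String (List (PySem.Dict String String)))
    (h : pvInv a g) : pvInv (trades.foldl pvStepA a) (trades.foldl pvStepB g) := by
  induction trades generalizing a g with
  | nil => exact h
  | cons t ts ih => exact ih _ _ (pv_inv_step a g t h)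

-- ===== VERDICT (by name: the statement is the Claim_ definition above) =====
theorem get_open_positions_spec : Claim_equal_get_open_positions := by
  intro trades _
  unfold Spec_get_open_positions get_open_positions get_open_positions_alt
  have h := pv_inv_foldl trades PySem.Dict.empty PySem.Dict.empty
    ⟨by simp [PySem.Dict.empty], by simp [PySem.Dict.empty], by simp⟩
  rw [h.1, List.map_map]
  rfl
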